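-- pv_equiv track=rewrite | github.com/EddieMjiyakho/DataProphet | app/services/polymer_service.py | react_polymer
-- ===== SOURCE A (Python) =====
-- def react_polymer(polymer: str) -> tuple[str, int]:
--     """
--     Process polymer chain reaction and return stable polymer + reaction count.
--     Uses a stack-based approach that handles all reactions in one pass.
--
--     Args:
--         polymer: Input polymer string
--
--     Returns:
--         tuple: (stable_polymer, reaction_count)
--     """
--     if not polymer:
--         return "", 0
--
--     stack = []
--     reaction_count = 0
--
--     for char in polymer:
--         if stack and will_react(stack[-1], char):
--             # Reaction occurs - remove the top of stack
--             stack.pop()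
--             reaction_count += 1
--         else:
--             stack.append(char)
--
--     return ''.join(stack), reaction_count
--
-- def will_react(a: str, b: str) -> bool:
--     """
--     Check if two monomers will react.
--     They react if they are the same letter but different cases.
--     """
--     return a != b and a.lower() == b.lower()
-- ===== SOURCE B (Python) =====
-- def will_react(a: str, b: str) -> bool:
--     return a != b and a.lower() == b.lower()
--
--
-- def react_polymer(polymer: str) -> tuple[str, int]:
--     current = polymer
--     total = 0
--     while True:
--         out = []
--         removed = 0
--         i = 0
--         n = len(current)
--         while i < n:
--             if i + 1 < n and will_react(current[i], current[i + 1]):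
--                 i += 2
--                 removed += 1
--             else:
--                 out.append(current[i])
--                 i += 1
--         if removed == 0:
--             return current, total
--         total += removed
--         current = ''.join(out)
-- ===== Notes on version B (the rewrite author's own statement) =====
-- stated objective: alternative
-- what changed: Replaced the single stack pass by a fixpoint of repeated left-to-right scans that each remove every non-overlapping reacting adjacent pair, iterated until a scan removes nothing; the count is accumulated across passes instead of incremented per pop.
import Mathlib
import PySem

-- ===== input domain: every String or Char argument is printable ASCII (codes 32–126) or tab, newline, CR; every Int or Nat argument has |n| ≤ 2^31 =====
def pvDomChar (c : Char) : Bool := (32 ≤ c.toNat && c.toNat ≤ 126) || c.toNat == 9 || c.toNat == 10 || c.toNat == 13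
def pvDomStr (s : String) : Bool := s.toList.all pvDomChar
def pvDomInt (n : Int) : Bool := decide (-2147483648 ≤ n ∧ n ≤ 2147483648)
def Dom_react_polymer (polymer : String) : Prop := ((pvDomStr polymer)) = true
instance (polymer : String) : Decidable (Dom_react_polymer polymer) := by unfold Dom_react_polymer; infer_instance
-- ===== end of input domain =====

-- B replaces A's single stack pass by repeated scans that remove reacting adjacent
-- pairs until a fixpoint; same return value, no speed claim (objective: alternative).

-- ===== PORT A =====
-- will_react(a, b) on 1-character strings: a != b and a.lower() == b.lower()
def pvWillReact (a b : Char) : Bool :=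
  (a != b) && (PySem.Chars.lowerChar a == PySem.Chars.lowerChar b)

-- one iteration of A's for-loop; the stack is kept head-as-top (''.join reverses it back)
def pvStepA (st : List Char × Int) (c : Char) : List Char × Int :=
  match st with
  | (t :: ts, k) => if pvWillReact t c then (ts, k + 1) else (c :: t :: ts, k)
  | ([], k) => ([c], k)

def react_polymer (polymer : String) : String × Int :=
  if polymer.toList = [] then ("", 0)
  else
    let r := polymer.toList.foldl pvStepA ([], 0)
    (String.ofList r.1.reverse, r.2)

-- ===== PORT B =====
-- one scan (B's inner while-loop): walk left to right, drop each reacting adjacent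
-- pair (without re-pairing within the pass), return kept characters and #removed
def pvScan : List Char → List Char × Nat
  | a :: b :: rest =>
      if pvWillReact a b then ((pvScan rest).1, (pvScan rest).2 + 1)
      else (a :: (pvScan (b :: rest)).1, (pvScan (b :: rest)).2)
  | [a] => ([a], 0)
  | [] => ([], 0)

-- each scan removes 2 characters per removal (used only for pvLoop's termination)
theorem pvScan_len (xs : List Char) : (pvScan xs).1.length + 2 * (pvScan xs).2 = xs.length := by
  induction xs using pvScan.induct with
  | case1 a b rest hr ih => simp [pvScan, hr]; omega
  | case2 a b rest hr ih => simp [pvScan, hr]; simp only [List.length_cons] at ih; omega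
  | case3 a => simp [pvScan]
  | case4 => simp [pvScan]

-- B's outer while-True loop
def pvLoop (cur : List Char) (total : Int) : List Char × Int :=
  if (pvScan cur).2 = 0 then (cur, total)
  else pvLoop (pvScan cur).1 (total + (pvScan cur).2)
termination_by cur.length
decreasing_by have := pvScan_len cur; omega

def react_polymer_alt (polymer : String) : String × Int :=
  let r := pvLoop polymer.toList 0
  (String.ofList r.1, r.2)

-- ===== PRECONDITION & SPEC =====
def Spec_react_polymer (polymer : String) (out : String × Int) : Prop := out = react_polymer_alt polymer
instance (polymer : String) (out : String × Int) : Decidable (Spec_react_polymer polymer out) := by unfold Spec_react_polymer; infer_instance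

-- ===== CLAIM (what is proved, stated in full; the proofs are below) =====
def Claim_equal_react_polymer : Prop := ∀ (polymer : String), Dom_react_polymer polymer → Spec_react_polymer polymer (react_polymer polymer)

-- ===== LEMMAS AND PROOFS =====

-- the stack content of A's fold, without the counter
def pvRun : List Char → List Char → List Char
  | st, [] => st
  | t :: ts, c :: cs => if pvWillReact t c then pvRun ts cs else pvRun (c :: t :: ts) cs
  | [], c :: cs => pvRun [c] cs

-- a list with no reacting adjacent pair
def pvIrred (xs : List Char) : Prop := List.IsChain (fun x y => pvWillReact x y = false) xs

theorem pvChar_eq_of_toNat (a b : Char) (h : a.toNat = b.toNat) : a = b :=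
  Char.ext (UInt32.toNat_inj.mp h)

theorem pvLower_toNat (c : Char) :
    (PySem.Chars.lowerChar c).toNat =
      if 65 ≤ c.toNat ∧ c.toNat ≤ 90 then c.toNat + 32 else c.toNat := by
  have hA : ('A' ≤ c) ↔ (65 ≤ c.toNat) := Iff.rfl
  have hZ : (c ≤ 'Z') ↔ (c.toNat ≤ 90) := Iff.rfl
  simp only [PySem.Chars.lowerChar, PySem.Chars.isupper, Bool.and_eq_true, decide_eq_true_eq, hA, hZ]
  by_cases h1 : 65 ≤ c.toNat <;> by_cases h2 : c.toNat ≤ 90 <;>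
    simp [h1, h2, Char.toNat_ofNat, Nat.isValidChar] <;> omega

theorem pvWillReact_symm (a b : Char) : pvWillReact a b = pvWillReact b a := by
  simp only [pvWillReact]
  rw [bne_comm, Bool.beq_comm]

-- a character reacts with at most one character (the other-case letter)
theorem pvWillReact_unique {a b t : Char} (hb : pvWillReact a b = true)
    (ht : pvWillReact a t = true) : b = t := by
  simp only [pvWillReact, Bool.and_eq_true, bne_iff_ne, ne_eq, beq_iff_eq] at hb ht
  apply pvChar_eq_of_toNat
  have hab : a.toNat ≠ b.toNat := fun h => hb.1 (pvChar_eq_of_toNat a b h)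
  have hat : a.toNat ≠ t.toNat := fun h => ht.1 (pvChar_eq_of_toNat a t h)
  have h1 := congrArg Char.toNat hb.2
  have h2 := congrArg Char.toNat ht.2
  rw [pvLower_toNat, pvLower_toNat] at h1 h2
  split_ifs at h1 h2 <;> omega

theorem pvFoldA_fst (xs : List Char) : ∀ (st : List Char) (k : Int),
    (xs.foldl pvStepA (st, k)).1 = pvRun st xs := by
  induction xs with
  | nil => intro st k; simp [pvRun]
  | cons c cs ih =>
    intro st k
    cases st with
    | nil => simpa [List.foldl, pvStepA, pvRun] using ih [c] k
    | cons t ts =>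
      by_cases h : pvWillReact t c <;> simp [List.foldl, pvStepA, pvRun, h, ih]

theorem pvFoldA_snd (xs : List Char) : ∀ (st : List Char) (k : Int),
    2 * (xs.foldl pvStepA (st, k)).2 + ((xs.foldl pvStepA (st, k)).1.length : Int)
      = 2 * k + st.length + xs.length := by
  induction xs with
  | nil => intro st k; simp
  | cons c cs ih =>
    intro st k
    cases st with
    | cons t ts =>
      by_cases h : pvWillReact t c
      · have := ih ts (k + 1); simp only [List.foldl, pvStepA, h, if_pos] at this ⊢
        simp only [List.length_cons] at this ⊢; push_cast at this ⊢; omega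
      · have := ih (c :: t :: ts) k; simp only [List.foldl, pvStepA, h, if_neg, Bool.false_eq_true,
          not_false_iff] at this ⊢
        simp only [List.length_cons] at this ⊢; push_cast at this ⊢; omega
    | nil =>
      have := ih [c] k; simp only [List.foldl, pvStepA] at this ⊢
      simp only [List.length_cons, List.length_nil] at this ⊢; push_cast at this ⊢; omega

-- one scan preserves the result of A's stack pass
theorem pvScan_run (xs : List Char) : ∀ st : List Char, pvIrred st →
    pvRun st (pvScan xs).1 = pvRun st xs := by
  induction xs using pvScan.induct with
  | case1 a b rest hr ih =>
    intro st hst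
    rw [show (pvScan (a :: b :: rest)).1 = (pvScan rest).1 by simp [pvScan, hr]]
    cases st with
    | nil =>
      rw [show pvRun [] (a :: b :: rest) = pvRun [] rest by simp [pvRun, hr]]
      exact ih [] hst
    | cons t ts =>
      by_cases hta : pvWillReact t a
      · -- the top of the stack reacts with a; it must equal b
        have hbt : b = t := pvWillReact_unique hr (by rw [pvWillReact_symm]; exact hta)
        have hrun : pvRun (t :: ts) (a :: b :: rest) = pvRun (t :: ts) rest := by
          subst hbt
          cases ts with
          | nil => simp [pvRun, hta]
          | cons u us =>
            have hu : pvWillReact u b = false := by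
              rw [pvWillReact_symm]
              exact (List.isChain_cons_cons.mp hst).1
            simp [pvRun, hta, hu]
        rw [hrun]; exact ih _ hst
      · have hrun : pvRun (t :: ts) (a :: b :: rest) = pvRun (t :: ts) rest := by
          simp [pvRun, hta, hr]
        rw [hrun]; exact ih _ hst
  | case2 a b rest hr ih =>
    intro st hst
    rw [show (pvScan (a :: b :: rest)).1 = a :: (pvScan (b :: rest)).1 by simp [pvScan, hr]]
    cases st with
    | nil =>
      rw [show pvRun [] (a :: (pvScan (b :: rest)).1) = pvRun [a] (pvScan (b :: rest)).1 from rfl,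
          show pvRun [] (a :: b :: rest) = pvRun [a] (b :: rest) from rfl]
      exact ih [a] (by simp [pvIrred])
    | cons t ts =>
      by_cases hta : pvWillReact t a
      · rw [show pvRun (t :: ts) (a :: (pvScan (b :: rest)).1) = pvRun ts (pvScan (b :: rest)).1 by
              simp [pvRun, hta],
            show pvRun (t :: ts) (a :: b :: rest) = pvRun ts (b :: rest) by simp [pvRun, hta]]
        exact ih ts (List.isChain_cons.mp hst).2
      · rw [show pvRun (t :: ts) (a :: (pvScan (b :: rest)).1)
              = pvRun (a :: t :: ts) (pvScan (b :: rest)).1 by simp [pvRun, hta],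
            show pvRun (t :: ts) (a :: b :: rest) = pvRun (a :: t :: ts) (b :: rest) by
              simp [pvRun, hta]]
        apply ih
        refine List.isChain_cons_cons.mpr ⟨?_, hst⟩
        rw [pvWillReact_symm]; simpa using hta
  | case3 a => intro st _; rfl
  | case4 => intro st _; rfl

-- a scan that removes nothing leaves the list unchanged, and that list is irreducible
theorem pvScan_fix (xs : List Char) (h : (pvScan xs).2 = 0) : (pvScan xs).1 = xs ∧ pvIrred xs := by
  induction xs using pvScan.induct with
  | case1 a b rest hr ih => simp [pvScan, hr] at h
  | case2 a b rest hr ih =>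
    simp only [pvScan, hr, Bool.false_eq_true, if_false] at h ⊢
    obtain ⟨h1, h2⟩ := ih h
    exact ⟨by simp [h1], List.isChain_cons_cons.mpr ⟨by simpa using hr, h2⟩⟩
  | case3 a => exact ⟨rfl, by simp [pvIrred]⟩
  | case4 => exact ⟨rfl, by simp [pvIrred]⟩

-- A's stack pass pushes everything on an irreducible input
theorem pvRun_irred (xs : List Char) : ∀ st : List Char, pvIrred xs → pvIrred st →
    (∀ t ∈ st.head?, ∀ a ∈ xs.head?, pvWillReact t a = false) →
    pvRun st xs = xs.reverse ++ st := by
  induction xs with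
  | nil => intro st _ _ _; simp [pvRun]
  | cons c cs ih =>
    intro st hxs hst hcompat
    have hcs : pvIrred cs := (List.isChain_cons.mp hxs).2
    have hhead : ∀ y ∈ cs.head?, pvWillReact c y = false := (List.isChain_cons.mp hxs).1
    cases st with
    | nil =>
      rw [show pvRun [] (c :: cs) = pvRun [c] cs from rfl]
      rw [ih [c] hcs (by simp [pvIrred]) (by simpa using hhead)]
      simp
    | cons t ts =>
      have htc : pvWillReact t c = false := by
        have := hcompat t (by simp) c (by simp)
        exact this
      rw [show pvRun (t :: ts) (c :: cs) = pvRun (c :: t :: ts) cs by simp [pvRun, htc]]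
      rw [ih (c :: t :: ts) hcs
            (List.isChain_cons_cons.mpr ⟨by rw [pvWillReact_symm]; exact htc, hst⟩)
            (by simpa using hhead)]
      simp

theorem pvLoop_fst (cur : List Char) (total : Int) :
    (pvLoop cur total).1 = (pvRun [] cur).reverse := by
  induction cur, total using pvLoop.induct with
  | case1 cur total h =>
    obtain ⟨h1, h2⟩ := pvScan_fix cur h
    rw [pvLoop, if_pos h]
    rw [pvRun_irred cur [] h2 (by simp [pvIrred]) (by simp)]
    simp
  | case2 cur total h ih =>
    rw [pvLoop, if_neg h]
    rw [ih]
    rw [pvScan_run cur [] (by simp [pvIrred])]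

theorem pvLoop_snd (cur : List Char) (total : Int) :
    2 * (pvLoop cur total).2 + ((pvLoop cur total).1.length : Int) = 2 * total + cur.length := by
  induction cur, total using pvLoop.induct with
  | case1 cur total h => rw [pvLoop, if_pos h]
  | case2 cur total h ih =>
    rw [pvLoop, if_neg h]
    have hl := pvScan_len cur
    push_cast at ih ⊢
    omega

-- ===== VERDICT (by name: the statement is the Claim_ definition above) =====
theorem react_polymer_spec : Claim_equal_react_polymer := by
  intro polymer _
  simp only [Spec_react_polymer, react_polymer, react_polymer_alt]
  by_cases hemp : polymer.toList = []
  · rw [if_pos hemp, hemp]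
    simp [pvLoop, pvScan, String.ofList_nil]
  · rw [if_neg hemp]
    have hf := pvFoldA_fst polymer.toList [] 0
    have hs := pvFoldA_snd polymer.toList [] 0
    have hlf := pvLoop_fst polymer.toList 0
    have hls := pvLoop_snd polymer.toList 0
    have hstr : (polymer.toList.foldl pvStepA ([], 0)).1.reverse = (pvLoop polymer.toList 0).1 := by
      rw [hf, hlf]
    have hlen := congrArg List.length hstr
    simp only [List.length_reverse] at hlen
    simp only [List.length_nil, Nat.cast_zero] at hs hls
    refine Prod.ext ?_ ?_
    · simpa using congrArg String.ofList hstr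
    · dsimp only
      omega
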